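-- pv_equiv track=rewrite | github.com/vitopod/amiga-player-manager-toolkit | PMSaveDiskTool_Mac/PMSaveDiskTool.py | _movem_regs
-- ===== SOURCE A (Python) =====
-- _DN = [f'D{i}' for i in range(8)]
--
-- _AN = [f'A{i}' for i in range(8)]
--
-- def _movem_regs(mask, predec):
--     """Format MOVEM register list."""
--     if predec:
--         # Reversed bit order for -(An)
--         bits = [(mask >> (15 - i)) & 1 for i in range(16)]
--     else:
--         bits = [(mask >> i) & 1 for i in range(16)]
--     names = _DN + [_AN[i] for i in range(8)]
--     parts = []
--     i = 0
--     while i < 16: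
--         if bits[i]:
--             start = i
--             while i + 1 < 16 and bits[i + 1]:
--                 i += 1
--             if i == start:
--                 parts.append(names[start])
--             else:
--                 parts.append(f'{names[start]}-{names[i]}')
--         i += 1
--     return '/'.join(parts) if parts else '???'
-- ===== SOURCE B (Python) =====
-- def _movem_regs(mask, predec):
--     """Format MOVEM register list."""
--     names = [f'D{i}' for i in range(8)] + [f'A{i}' for i in range(8)]
--     b = lambda i: 0 <= i < 16 and bool((mask >> ((15 - i) if predec else i)) & 1)
--     # edge detection: a run starts where a set bit follows a clear one,
--     # and ends where a set bit precedes a clear one; zip pairs them up.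
--     starts = [i for i in range(16) if b(i) and not b(i - 1)]
--     ends = [i for i in range(16) if b(i) and not b(i + 1)]
--     if not starts:
--         return '???'
--     return '/'.join(names[s] if s == e else f'{names[s]}-{names[e]}'
--                     for s, e in zip(starts, ends))
-- ===== Notes on version B (the rewrite author's own statement) =====
-- stated objective: alternative
-- what changed: A scans a bit array with a nested while loop carrying run state; B does stateless edge detection: it filters the rising edges (set bit after a clear one) and falling edges (set bit before a clear one) independently and zips them into (start,end) pairs.
import Mathlib
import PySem

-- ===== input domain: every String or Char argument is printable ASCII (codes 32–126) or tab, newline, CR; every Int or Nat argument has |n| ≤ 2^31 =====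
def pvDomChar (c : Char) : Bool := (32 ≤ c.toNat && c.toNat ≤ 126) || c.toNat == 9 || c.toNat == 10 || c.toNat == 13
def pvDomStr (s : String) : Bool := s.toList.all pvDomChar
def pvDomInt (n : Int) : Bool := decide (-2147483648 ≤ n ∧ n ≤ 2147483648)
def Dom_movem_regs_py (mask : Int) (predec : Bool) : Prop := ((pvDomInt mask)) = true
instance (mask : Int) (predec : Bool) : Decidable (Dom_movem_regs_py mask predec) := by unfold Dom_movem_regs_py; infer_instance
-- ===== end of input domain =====

-- B replaces A's stateful nested-while run scan by stateless edge detection: it filters the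
-- rising edges (set bit after a clear one) and the falling edges (set bit before a clear one)
-- independently and zips them into (start,end) pairs (alternative algorithm; no speed claim).

-- ===== PORT A =====
-- (mask >> k) & 1 ; Python's >> IS Lean's Int >>> with Nat shift, & via PySem.Int.band (both exact)
def pvBit (mask : Int) (k : Nat) : Int := PySem.Int.band (mask >>> k) 1

-- _DN = [f'D{i}' for i in range(8)] ; f-string of an int = "D" ++ str(i)
def pvDN : List String := (List.range 8).map (fun (i : Nat) => "D" ++ PySem.Int.toStr (i : Int))
-- _AN = [f'A{i}' for i in range(8)]
def pvAN : List String := (List.range 8).map (fun (i : Nat) => "A" ++ PySem.Int.toStr (i : Int))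

-- inner 'while i + 1 < 16 and bits[i + 1]: i += 1' ; returns final i.
-- bits[j] with j provably in [0,16): ported by hand as getD (exact, index always in range).
def pvEat (bits : List Int) (i : Nat) : Nat :=
  if _h : i + 1 < 16 then
    if bits.getD (i + 1) 0 != 0 then pvEat bits (i + 1) else i
  else i
termination_by 16 - i

-- needed by pvLoopA's termination: the inner while never moves i backwards
theorem pvEat_ge (bits : List Int) (i : Nat) : i ≤ pvEat bits i := by
  unfold pvEat
  split
  · split
    · have := pvEat_ge bits (i + 1); omega
    · omega
  · omega
termination_by 16 - i

-- outer 'while i < 16' loop building parts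
def pvLoopA (bits : List Int) (names : List String) (parts : List String) (i : Nat) : List String :=
  if _h : i < 16 then
    if bits.getD i 0 != 0 then
      let start := i
      let i' := pvEat bits i
      let parts' :=
        if i' = start then parts ++ [names.getD start ""]
        else parts ++ [names.getD start "" ++ "-" ++ names.getD i' ""]
      pvLoopA bits names parts' (i' + 1)
    else pvLoopA bits names parts (i + 1)
  else parts
termination_by 16 - i
decreasing_by
  · have := pvEat_ge bits i; omega
  · omega

def movem_regs_py (mask : Int) (predec : Bool) : String :=
  let bits : List Int :=
    if predec then (List.range 16).map (fun i => pvBit mask (15 - i))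
    else (List.range 16).map (fun i => pvBit mask i)
  let names := pvDN ++ (List.range 8).map (fun i => pvAN.getD i "")
  let parts := pvLoopA bits names [] 0
  if parts = [] then "???" else PySem.Str.join "/" parts

-- ===== PORT B =====
-- b = lambda i: 0 <= i < 16 and bool((mask >> ((15 - i) if predec else i)) & 1)
-- (the range guard short-circuits, so the shift amount is a Nat in [0,15] whenever evaluated)
def pvB (mask : Int) (predec : Bool) (i : Int) : Bool :=
  if 0 ≤ i ∧ i < 16 then pvBit mask (if predec then 15 - i.toNat else i.toNat) != 0 else false

def movem_regs_py_alt (mask : Int) (predec : Bool) : String :=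
  let names := (List.range 8).map (fun (i : Nat) => "D" ++ PySem.Int.toStr (i : Int)) ++
               (List.range 8).map (fun (i : Nat) => "A" ++ PySem.Int.toStr (i : Int))
  let starts := (List.range 16).filter
    (fun (i : Nat) => pvB mask predec (i : Int) && !pvB mask predec ((i : Int) - 1))
  let ends := (List.range 16).filter
    (fun (i : Nat) => pvB mask predec (i : Int) && !pvB mask predec ((i : Int) + 1))
  if starts = [] then "???"
  else PySem.Str.join "/"
    ((starts.zip ends).map (fun (se : Nat × Nat) =>
      if se.1 = se.2 then names.getD se.1 ""
      else names.getD se.1 "" ++ "-" ++ names.getD se.2 ""))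

-- ===== PRECONDITION & SPEC =====
def Spec_movem_regs_py (mask : Int) (predec : Bool) (out : String) : Prop := out = movem_regs_py_alt mask predec
instance (mask : Int) (predec : Bool) (out : String) : Decidable (Spec_movem_regs_py mask predec out) := by unfold Spec_movem_regs_py; infer_instance

-- ===== CLAIM (what is proved, stated in full; the proofs are below) =====
def Claim_equal_movem_regs_py : Prop := ∀ (mask : Int) (predec : Bool), Dom_movem_regs_py mask predec → Spec_movem_regs_py mask predec (movem_regs_py mask predec)

-- ===== LEMMAS AND PROOFS =====

-- the indices in [i,16) satisfying p, in order (specification device for both sides)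
def pvFilt (p : Nat → Bool) (i : Nat) : List Nat :=
  (List.range' i (16 - i)).filter p

theorem pvFilt_step (p : Nat → Bool) (i : Nat) (hi : i < 16) :
    pvFilt p i = if p i then i :: pvFilt p (i + 1) else pvFilt p (i + 1) := by
  unfold pvFilt
  have h16 : 16 - i = (16 - (i + 1)) + 1 := by omega
  rw [h16, List.range'_succ]
  by_cases hb : p i <;> simp [hb]

theorem pvFilt_16 (p : Nat → Bool) : pvFilt p 16 = [] := by
  unfold pvFilt; norm_num

theorem pvFilt_ge (p : Nat → Bool) (i q : Nat) (h : q ∈ pvFilt p i) : i ≤ q := by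
  unfold pvFilt at h
  have := List.mem_filter.mp h
  have := List.mem_range'.mp this.1
  omega

-- recursive grouping of an (increasing) position list into maximal consecutive runs
def pvG (se : Nat × Nat) (ps : List Nat) : List (Nat × Nat) :=
  match ps with
  | [] => [se]
  | q :: rest => if se.2 + 1 = q then pvG (se.1, q) rest else se :: pvG (q, q) rest

def pvGroupRuns (ps : List Nat) : List (Nat × Nat) :=
  match ps with
  | [] => []
  | p :: rest => pvG (p, p) rest

theorem pvG_ne_nil (se : Nat × Nat) (ps : List Nat) : pvG se ps ≠ [] := by
  cases ps with
  | nil => simp [pvG]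
  | cons q rest =>
    unfold pvG
    split
    · exact pvG_ne_nil _ _
    · simp

theorem pvG_far (s e : Nat) (l : List Nat) (h : ∀ q ∈ l, e + 1 < q) :
    pvG (s, e) l = (s, e) :: pvGroupRuns l := by
  cases l with
  | nil => simp [pvG, pvGroupRuns]
  | cons q rest =>
    have : e + 1 ≠ q := by have := h q (by simp); omega
    simp [pvG, pvGroupRuns, this]

-- the three filtered index lists of B, over an abstract bit function f
def pvFB (f : Nat → Bool) (j : Nat) : Bool := decide (j < 16) && f j
def pvPrev (f : Nat → Bool) : Nat → Bool
  | 0 => false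
  | k + 1 => pvFB f k
def pvS (f : Nat → Bool) (i : Nat) : List Nat := pvFilt (fun j => f j && !pvPrev f j) i
def pvE (f : Nat → Bool) (i : Nat) : List Nat := pvFilt (fun j => f j && !pvFB f (j + 1)) i
def pvP (f : Nat → Bool) (i : Nat) : List Nat := pvFilt f i

-- rising/falling-edge zip = run grouping: mutual scan invariant.
-- pvOutside: no run is open entering index i; pvInside: a run with start s is open at j (f j = true).
mutual

theorem pvOutside (f : Nat → Bool) (i : Nat) (hi : i ≤ 16) (h : i = 0 ∨ f (i - 1) = false) :
    (pvS f i).zip (pvE f i) = pvGroupRuns (pvP f i) := by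
  by_cases hlt : i < 16
  · by_cases hf : f i = true
    · have hprev : pvPrev f i = false := by
        cases i with
        | zero => rfl
        | succ k =>
          have hk : f k = false := by
            rcases h with h0 | hfk
            · omega
            · simpa using hfk
          simp [pvPrev, pvFB, hk]
      have hS : pvS f i = i :: pvS f (i + 1) := by
        rw [pvS, pvFilt_step _ _ hlt, if_pos (by simp [hf, hprev])]; rfl
      have hP : pvP f i = i :: pvP f (i + 1) := by
        rw [pvP, pvFilt_step _ _ hlt, if_pos hf]; rfl
      rw [hS, hP]
      rw [show pvGroupRuns (i :: pvP f (i + 1)) = pvG (i, i) (pvP f (i + 1)) from rfl]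
      exact pvInside f i (by omega) hf i
    · have hf' : f i = false := by simpa using hf
      have hS : pvS f i = pvS f (i + 1) := by
        rw [pvS, pvFilt_step _ _ hlt, if_neg (by simp [hf'])]; rfl
      have hE : pvE f i = pvE f (i + 1) := by
        rw [pvE, pvFilt_step _ _ hlt, if_neg (by simp [hf'])]; rfl
      have hP : pvP f i = pvP f (i + 1) := by
        rw [pvP, pvFilt_step _ _ hlt, if_neg (by simp [hf'])]; rfl
      rw [hS, hE, hP]
      exact pvOutside f (i + 1) (by omega) (Or.inr (by simpa using hf'))
  · have h16 : i = 16 := by omega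
    subst h16
    simp [pvS, pvE, pvP, pvFilt_16, pvGroupRuns]
termination_by (16 - i, 1)

theorem pvInside (f : Nat → Bool) (j : Nat) (hj : j + 1 ≤ 16) (hf : f j = true) (s : Nat) :
    (s :: pvS f (j + 1)).zip (pvE f j) = pvG (s, j) (pvP f (j + 1)) := by
  have hjlt : j < 16 := by omega
  by_cases hn : pvFB f (j + 1) = true
  · -- next bit set: run continues
    have hlt : j + 1 < 16 := by
      by_contra hc
      simp [pvFB, show ¬ (j + 1 < 16) from hc] at hn
    have hf1 : f (j + 1) = true := by simpa [pvFB, hlt] using hn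
    have hE : pvE f j = pvE f (j + 1) := by
      rw [pvE, pvFilt_step _ _ hjlt, if_neg (by simp [hf, hn])]; rfl
    have hS : pvS f (j + 1) = pvS f (j + 2) := by
      rw [pvS, pvFilt_step _ _ hlt, if_neg (by simp [pvPrev, pvFB, hjlt, hf])]; rfl
    have hP : pvP f (j + 1) = (j + 1) :: pvP f (j + 2) := by
      rw [pvP, pvFilt_step _ _ hlt, if_pos hf1]; rfl
    rw [hE, hS, hP]
    rw [show pvG (s, j) ((j + 1) :: pvP f (j + 2)) = pvG (s, j + 1) (pvP f (j + 2)) by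
      simp [pvG]]
    exact pvInside f (j + 1) (by omega) hf1 s
  · -- next bit clear (or j = 15): run ends at j
    have hE : pvE f j = j :: pvE f (j + 1) := by
      rw [pvE, pvFilt_step _ _ hjlt, if_pos (by simp [hf, hn])]; rfl
    have hfar : pvG (s, j) (pvP f (j + 1)) = (s, j) :: pvGroupRuns (pvP f (j + 1)) := by
      apply pvG_far
      intro q hq
      have hq1 : j + 1 ≤ q := pvFilt_ge _ _ _ hq
      rcases Nat.lt_or_ge q 16 with hq16 | hq16
      · have hfq : f q = true := (List.mem_filter.mp hq).2
        have : q ≠ j + 1 := by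
          intro he; subst he
          simp [pvFB, hq16, hfq] at hn
        omega
      · have := List.mem_range'.mp (List.mem_filter.mp hq).1
        omega
    rw [hE, hfar, List.zip_cons_cons]
    congr 1
    by_cases hlt : j + 1 < 16
    · have hf1 : f (j + 1) = false := by
        by_contra hc
        simp [pvFB, hlt, show f (j + 1) = true by simpa using hc] at hn
      have hS : pvS f (j + 1) = pvS f (j + 2) := by
        rw [pvS, pvFilt_step _ _ hlt, if_neg (by simp [hf1])]; rfl
      have hE2 : pvE f (j + 1) = pvE f (j + 2) := by
        rw [pvE, pvFilt_step _ _ hlt, if_neg (by simp [hf1])]; rfl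
      have hP : pvP f (j + 1) = pvP f (j + 2) := by
        rw [pvP, pvFilt_step _ _ hlt, if_neg (by simp [hf1])]; rfl
      rw [hS, hE2, hP]
      exact pvOutside f (j + 2) (by omega) (Or.inr (by simpa using hf1))
    · have h16 : j + 1 = 16 := by omega
      rw [h16]
      simp [pvS, pvE, pvP, pvFilt_16, pvGroupRuns]
termination_by (16 - j, 0)

end

-- ===== A-side characterization (run scan = run grouping of the set positions) =====

def pvPosFrom (bits : List Int) (i : Nat) : List Nat :=
  pvFilt (fun j => bits.getD j 0 != 0) i

-- B's formatting function (the lambda in the B port)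
def pvFmt (names : List String) (se : Nat × Nat) : String :=
  if se.1 = se.2 then names.getD se.1 ""
  else names.getD se.1 "" ++ "-" ++ names.getD se.2 ""

theorem pvPosFrom_ge (bits : List Int) (i q : Nat) (h : q ∈ pvPosFrom bits i) : i ≤ q :=
  pvFilt_ge _ _ _ h

theorem pvFilt_nil (p : Nat → Bool) (i : Nat) (h : 16 ≤ i) : pvFilt p i = [] := by
  unfold pvFilt
  have h0 : 16 - i = 0 := by omega
  simp [h0]

theorem pvPosFrom_step (bits : List Int) (i : Nat) (hi : i < 16) :
    pvPosFrom bits i =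
      if bits.getD i 0 != 0 then i :: pvPosFrom bits (i + 1) else pvPosFrom bits (i + 1) := by
  rw [pvPosFrom, pvFilt_step _ _ hi]; rfl

theorem pvG_eat (bits : List Int) (i s : Nat) (hi : i < 16) :
    pvG (s, i) (pvPosFrom bits (i + 1)) =
      (s, pvEat bits i) :: pvGroupRuns (pvPosFrom bits (pvEat bits i + 1)) := by
  by_cases h1 : i + 1 < 16
  · by_cases hb : bits.getD (i + 1) 0 != 0
    · have he : pvEat bits i = pvEat bits (i + 1) := by
        rw [pvEat, dif_pos h1, if_pos hb]
      rw [he, pvPosFrom, pvFilt_step _ _ h1, if_pos hb]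
      have hstep : pvG (s, i) ((i + 1) :: pvFilt (fun j => bits.getD j 0 != 0) (i + 1 + 1)) =
          pvG (s, i + 1) (pvPosFrom bits (i + 1 + 1)) := by
        simp [pvG, pvPosFrom]
      rw [hstep]
      exact pvG_eat bits (i + 1) s h1
    · have he : pvEat bits i = i := by rw [pvEat, dif_pos h1, if_neg hb]
      rw [he, pvPosFrom_step bits (i + 1) h1, if_neg hb]
      exact pvG_far s i _ (fun q hq => by
        have := pvPosFrom_ge _ _ _ hq; omega)
  · have he : pvEat bits i = i := by rw [pvEat, dif_neg h1]
    have hnil : pvPosFrom bits (i + 1) = [] :=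
      pvFilt_nil _ _ (by omega)
    rw [he, hnil]
    simp [pvG, pvGroupRuns]
termination_by 16 - i

theorem pvLoopA_eq (bits : List Int) (names : List String) (parts : List String) (i : Nat) :
    pvLoopA bits names parts i = parts ++ (pvGroupRuns (pvPosFrom bits i)).map (pvFmt names) := by
  rw [pvLoopA]
  by_cases hi : i < 16
  · rw [dif_pos hi]
    by_cases hb : bits.getD i 0 != 0
    · rw [if_pos hb]
      rw [pvLoopA_eq bits names _ (pvEat bits i + 1)]
      rw [pvPosFrom_step bits i hi, if_pos hb]
      rw [show pvGroupRuns (i :: pvPosFrom bits (i + 1)) =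
          pvG (i, i) (pvPosFrom bits (i + 1)) from rfl]
      rw [pvG_eat bits i i hi]
      simp only [List.map_cons]
      by_cases he : pvEat bits i = i
      · rw [if_pos he]
        simp [pvFmt, he]
      · rw [if_neg he]
        have hne : ¬ (i = pvEat bits i) := fun h => he h.symm
        simp [pvFmt, hne]
    · rw [if_neg hb]
      rw [pvLoopA_eq bits names parts (i + 1), pvPosFrom_step bits i hi, if_neg hb]
  · rw [dif_neg hi]
    have hnil : pvPosFrom bits i = [] :=
      pvFilt_nil _ _ (by omega)
    simp [hnil, pvGroupRuns]
termination_by 16 - i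
decreasing_by
  · have := pvEat_ge bits i; omega
  · omega

theorem pvPos_eq (f : Nat → Bool) (g : Nat → Int) (hfg : ∀ j < 16, (g j != 0) = f j) :
    pvPosFrom ((List.range 16).map g) 0 = pvP f 0 := by
  unfold pvPosFrom pvP
  apply List.filter_congr
  intro j hj
  have hj16 : j < 16 := by
    have := List.mem_range'.mp hj; omega
  simp [List.getD, hj16, hfg j hj16]

theorem pvNames_eq :
    pvDN ++ (List.range 8).map (fun i => pvAN.getD i "") =
      (List.range 8).map (fun (i : Nat) => "D" ++ PySem.Int.toStr (i : Int)) ++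
      (List.range 8).map (fun (i : Nat) => "A" ++ PySem.Int.toStr (i : Int)) := by
  have hAN : (List.range 8).map (fun i => pvAN.getD i "") =
      (List.range 8).map (fun (i : Nat) => "A" ++ PySem.Int.toStr (i : Int)) := by
    apply List.map_congr_left
    intro j hj
    have hj8 : j < 8 := List.mem_range.mp hj
    simp [pvAN, List.getD, hj8]
  rw [hAN]
  rfl

-- B's Int-indexed bit test agrees with the Nat bit function f on the scanned indices
theorem pvB_nat (mask : Int) (predec : Bool) (j : Nat) (hj : j < 16) :
    pvB mask predec (j : Int) = (pvBit mask (if predec then 15 - j else j) != 0) := by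
  have h : (0 : Int) ≤ (j : Int) ∧ (j : Int) < 16 := by
    constructor <;> [positivity; exact_mod_cast hj]
  simp [pvB, h]

theorem pvB_out (mask : Int) (predec : Bool) (i : Int) (h : ¬ (0 ≤ i ∧ i < 16)) :
    pvB mask predec i = false := by
  simp [pvB, h]

-- ===== VERDICT (by name: the statement is the Claim_ definition above) =====
theorem movem_regs_py_spec : Claim_equal_movem_regs_py := by
  intro mask predec _
  unfold Spec_movem_regs_py
  simp only [movem_regs_py, movem_regs_py_alt]
  set f : Nat → Bool := fun j => pvBit mask (if predec then 15 - j else j) != 0 with hf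
  have hbits : (if predec then (List.range 16).map (fun i => pvBit mask (15 - i))
      else (List.range 16).map (fun i => pvBit mask i)) =
      (List.range 16).map (fun i => pvBit mask (if predec then 15 - i else i)) := by
    cases predec <;> simp
  rw [hbits]
  rw [pvLoopA_eq, pvNames_eq,
    pvPos_eq f (fun i => pvBit mask (if predec then 15 - i else i)) (fun j _ => rfl)]
  -- identify B's filters with pvS / pvE
  have hS : (List.range 16).filter
      (fun (i : Nat) => pvB mask predec (i : Int) && !pvB mask predec ((i : Int) - 1)) = pvS f 0 := by
    rw [pvS, pvFilt, show (16 - 0) = 16 from rfl, ← List.range_eq_range']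
    apply List.filter_congr
    intro j hj
    have hj16 : j < 16 := List.mem_range.mp hj
    have h1 : pvB mask predec (j : Int) = f j := pvB_nat mask predec j hj16
    have h2 : pvB mask predec ((j : Int) - 1) = pvPrev f j := by
      cases j with
      | zero =>
        rw [pvB_out mask predec _ (by norm_num)]
        rfl
      | succ k =>
        have hk16 : k < 16 := by omega
        have : ((k + 1 : Nat) : Int) - 1 = (k : Int) := by push_cast; ring
        rw [this, pvB_nat mask predec k hk16]
        simp [pvPrev, pvFB, hk16, hf]
    rw [h1, h2]
  have hE : (List.range 16).filter
      (fun (i : Nat) => pvB mask predec (i : Int) && !pvB mask predec ((i : Int) + 1)) = pvE f 0 := by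
    rw [pvE, pvFilt, show (16 - 0) = 16 from rfl, ← List.range_eq_range']
    apply List.filter_congr
    intro j hj
    have hj16 : j < 16 := List.mem_range.mp hj
    have h1 : pvB mask predec (j : Int) = f j := pvB_nat mask predec j hj16
    have h2 : pvB mask predec ((j : Int) + 1) = pvFB f (j + 1) := by
      by_cases hlt : j + 1 < 16
      · have : ((j : Int) + 1) = ((j + 1 : Nat) : Int) := by push_cast; ring
        rw [this, pvB_nat mask predec (j + 1) hlt]
        simp [pvFB, hlt, hf]
      · have h16 : j + 1 = 16 := by omega
        rw [pvB_out mask predec _ (by omega)]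
        simp [pvFB, hlt]
    rw [h1, h2]
  rw [hS, hE]
  have hzip : (pvS f 0).zip (pvE f 0) = pvGroupRuns (pvP f 0) :=
    pvOutside f 0 (by omega) (Or.inl rfl)
  rw [hzip, List.nil_append]
  have hmap : ∀ (ns : List String) (rs : List (Nat × Nat)),
      rs.map (fun se =>
        if se.1 = se.2 then ns.getD se.1 "" else ns.getD se.1 "" ++ "-" ++ ns.getD se.2 "") =
      rs.map (pvFmt ns) := by
    intro ns rs; rfl
  rw [hmap]
  set names := (List.range 8).map (fun (i : Nat) => "D" ++ PySem.Int.toStr (i : Int)) ++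
      (List.range 8).map (fun (i : Nat) => "A" ++ PySem.Int.toStr (i : Int))
  -- the two guards agree: starts = [] ↔ the run list is empty
  by_cases hs : pvS f 0 = []
  · have : pvGroupRuns (pvP f 0) = [] := by
      rw [← hzip, hs]; rfl
    simp [hs, this]
  · have hpos : pvP f 0 ≠ [] := by
      intro hp
      apply hs
      rw [pvS, pvP] at *
      have : pvFilt (fun j => f j && !pvPrev f j) 0 =
          (pvFilt f 0).filter (fun j => !pvPrev f j) := by
        unfold pvFilt
        rw [List.filter_filter]
        apply List.filter_congr
        intro a _
        rw [Bool.and_comm]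
      rw [this, hp]
      rfl
    have hg : pvGroupRuns (pvP f 0) ≠ [] := by
      cases hP : pvP f 0 with
      | nil => exact absurd hP hpos
      | cons p rest =>
        rw [show pvGroupRuns (p :: rest) = pvG (p, p) rest from rfl]
        exact pvG_ne_nil _ _
    have hgm : (pvGroupRuns (pvP f 0)).map (pvFmt names) ≠ [] := by
      cases hG : pvGroupRuns (pvP f 0) with
      | nil => exact absurd hG hg
      | cons r rs => simp
    simp [hs, hgm]
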